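-- pv_equiv track=rewrite | github.com/SimonSelg/ti-tuturial.github.io | semester1/info1/26.02_Freitag/binompdf.py | faculty
-- ===== SOURCE A (Python) =====
-- def faculty(n):
--     def gen():
--         yield 1
--         a, b = 1, 2
--         while True:
--             yield a
--             a, b = a*b,b+1
--     g = gen()
--     dic = {}
--     for i in range(n+1):
--         dic[i] = next(g)
--     return dic
-- ===== SOURCE B (Python) =====
-- def faculty(n):
--     def fact(k):
--         p = 1
--         for j in range(2, k + 1):
--             p *= j
--         return p
--     return {i: fact(i) for i in range(n + 1)}
-- ===== Notes on version B (the rewrite author's own statement) =====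
-- stated objective: simpler
-- what changed: Replaces the stateful generator coroutine carrying a running product across keys by a dict comprehension that recomputes each factorial independently from scratch.
import Mathlib
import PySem

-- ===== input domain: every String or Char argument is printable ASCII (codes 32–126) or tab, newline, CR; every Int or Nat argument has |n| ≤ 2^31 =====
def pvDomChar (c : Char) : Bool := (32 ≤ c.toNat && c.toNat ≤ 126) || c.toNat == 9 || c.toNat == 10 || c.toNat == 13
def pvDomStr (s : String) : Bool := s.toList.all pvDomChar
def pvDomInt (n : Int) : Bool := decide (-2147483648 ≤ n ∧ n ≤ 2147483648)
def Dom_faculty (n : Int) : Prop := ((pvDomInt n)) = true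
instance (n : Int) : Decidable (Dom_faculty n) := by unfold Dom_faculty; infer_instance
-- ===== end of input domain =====

-- ===== PORT A =====
-- B recomputes each factorial independently instead of A's generator carrying a running product; same return value.
-- A's generator: 'none' = before the first yield; 'some (a, b)' = the coroutine's (a, b) state after the first yield.
def facultyStepA (st : PySem.Dict Int Int × Option (Int × Int)) (i : Int) :
    PySem.Dict Int Int × Option (Int × Int) :=
  match st.2 with
  | none => (PySem.Dict.insert st.1 i 1, some (1, 2))
  | some (a, b) => (PySem.Dict.insert st.1 i a, some (a * b, b + 1))

def faculty (n : Int) : List (Int × Int) :=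
  ((PySem.List.pyRange 0 (n + 1)).foldl facultyStepA (PySem.Dict.empty, none)).1.items

-- ===== PORT B =====
def factB (k : Int) : Int :=
  (PySem.List.pyRange 2 (k + 1)).foldl (fun p j => p * j) 1

def faculty_alt (n : Int) : List (Int × Int) :=
  ((PySem.List.pyRange 0 (n + 1)).foldl (fun d i => PySem.Dict.insert d i (factB i))
    PySem.Dict.empty).items

-- ===== PRECONDITION & SPEC =====
def Spec_faculty (n : Int) (out : List (Int × Int)) : Prop := out = faculty_alt n
instance (n : Int) (out : List (Int × Int)) : Decidable (Spec_faculty n out) := by unfold Spec_faculty; infer_instance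

-- ===== CLAIM (what is proved, stated in full; the proofs are below) =====
def Claim_equal_faculty : Prop := ∀ (n : Int), Dom_faculty n → Spec_faculty n (faculty n)

-- ===== LEMMAS AND PROOFS =====

-- B's independent factorial satisfies the running-product recurrence A's generator maintains.
lemma factB_succ (m : Int) (hm : 1 ≤ m) : factB (m + 1) = factB m * (m + 1) := by
  unfold factB
  rw [show m + 1 + 1 = (m + 1) + 1 by ring,
      PySem.List.pyRange_one_succ_right (by omega : (2:Int) ≤ m + 1),
      List.foldl_append]
  simp

-- Loop invariant: after processing 0..m-1, A's dict equals B's dict and the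
-- generator state is (m!, m+1) (or untouched when the loop did not run).
lemma faculty_inv (m : Nat) :
    ((List.map (fun k => ((k:Nat):Int)) (List.range m)).foldl facultyStepA (PySem.Dict.empty, none))
      = ((List.map (fun k => ((k:Nat):Int)) (List.range m)).foldl
            (fun d i => PySem.Dict.insert d i (factB i)) PySem.Dict.empty,
         if m = 0 then none else some (factB (m:Int), (m:Int) + 1)) := by
  induction m with
  | zero => rfl
  | succ j ih =>
    rw [List.range_succ, List.map_append, List.foldl_append, List.foldl_append, ih]
    cases j with
    | zero => decide
    | succ k =>
      simp only [Nat.succ_ne_zero, if_false, List.map_cons, List.map_nil, List.foldl_cons,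
        List.foldl_nil, facultyStepA]
      have h1 : (1:Int) ≤ ((k:Nat):Int) + 1 := by omega
      push_cast
      rw [factB_succ _ h1]

-- ===== VERDICT (by name: the statement is the Claim_ definition above) =====
theorem faculty_spec : Claim_equal_faculty := by
  intro n _
  unfold Spec_faculty faculty faculty_alt
  by_cases h : n + 1 ≤ 0
  · rw [PySem.List.pyRange_one_eq_nil h]
    rfl
  · have hm : n + 1 = ((n + 1).toNat : Int) := by omega
    rw [hm, PySem.List.pyRange_zero_natCast, faculty_inv]
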